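-- pv_equiv track=rewrite | github.com/budcribar/QualcommNPU | 2.22.6.240515/lib/python/qti/aisw/converters/onnx/optimizations/einsum.py | match_eqn
-- ===== SOURCE A (Python) =====
-- def match_eqn(str1: str, str2: str) -> bool:
--     """
--     Function to match two equations.
--     e.g: bm,bhm->bh is equal to ij,ikj->ik
--     Operation is same, letters are different.
--     :param str1 (str): String representation of equation 1.
--     :param str2 (str): String representation of equation 2.
--     :returns bool: Boolean status indicating whether equations are matching or not.
--     """
--     char_to_index1 = {}
--     char_to_index2 = {}
--     if len(str1) != len(str2):
--         return False
--     values1 = list(str1)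
--     values2 = list(str2)
--     for i, val in enumerate(values1):
--         if val not in char_to_index1.keys():
--             char_to_index1[val] = i
--     for i, val in enumerate(values2):
--         if val not in char_to_index2.keys():
--             char_to_index2[val] = i
--     hash_map1 = {}
--     for i, val in enumerate(values1):
--         if char_to_index1[val] not in hash_map1.keys():
--             hash_map1[char_to_index1[val]] = []
--         l = hash_map1[char_to_index1[val]]
--         l.append(i)
--         hash_map1[char_to_index1[val]] = l
--     hash_map2 = {}
--     for i, val in enumerate(values2):
--         if char_to_index2[val] not in hash_map2.keys():
--             hash_map2[char_to_index2[val]] = []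
--         l = hash_map2[char_to_index2[val]]
--         l.append(i)
--         hash_map2[char_to_index2[val]] = l
--     status = hash_map1 == hash_map2
--     return status
-- ===== SOURCE B (Python) =====
-- def match_eqn(str1: str, str2: str) -> bool:
--     if len(str1) != len(str2):
--         return False
--     first1 = {}
--     first2 = {}
--     for i, (a, b) in enumerate(zip(str1, str2)):
--         if first1.setdefault(a, i) != first2.setdefault(b, i):
--             return False
--     return True
-- ===== Notes on version B (the rewrite author's own statement) =====
-- stated objective: simpler
-- what changed: Replaces A's five loops (two char-to-first-index dicts, two dicts grouping positions into lists, then a dict comparison) by one simultaneous pass over zip(str1, str2) that compares the first-occurrence index of the two characters on the fly and exits at the first mismatch.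
import Mathlib
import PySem

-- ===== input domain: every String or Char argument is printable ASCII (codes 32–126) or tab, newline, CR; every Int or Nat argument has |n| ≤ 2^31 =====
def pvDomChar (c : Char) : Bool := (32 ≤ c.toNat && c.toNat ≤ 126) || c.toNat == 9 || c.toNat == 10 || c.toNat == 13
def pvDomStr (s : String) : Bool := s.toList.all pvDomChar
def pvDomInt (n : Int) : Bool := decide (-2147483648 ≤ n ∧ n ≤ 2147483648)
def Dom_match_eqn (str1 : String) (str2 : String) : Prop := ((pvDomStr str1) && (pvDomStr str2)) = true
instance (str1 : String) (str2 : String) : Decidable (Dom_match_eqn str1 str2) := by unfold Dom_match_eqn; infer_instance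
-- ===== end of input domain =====

-- B replaces A's five dict-building loops and final dict comparison by one simultaneous
-- pass over the zipped strings comparing first-occurrence indices on the fly (objective: simpler).

-- ===== PORT A =====
-- Python's `==` on dicts compares them as unordered mappings (same key set, same value per
-- key); this helper is that comparison for Dict Int (List Int).
def pyDictEqIntList (d1 d2 : PySem.Dict Int (List Int)) : Bool :=
  (d1.keys.all fun k => d2.contains k && (d1.getD k [] == d2.getD k [])) &&
  (d2.keys.all fun k => d1.contains k)

-- first two loops of A: char -> index of its first occurrence
def ctiFold (values : List Char) : PySem.Dict Char Int :=
  (PySem.List.enumerate values).foldl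
    (fun d p => if d.contains p.2 then d else d.insert p.2 p.1) PySem.Dict.empty

-- last two loops of A: first-occurrence index -> list of all positions of that character.
-- `cti.getD p.2 0` is Python's `char_to_index[val]`: the key is always present, so getD is exact.
def hashFold (values : List Char) (cti : PySem.Dict Char Int) : PySem.Dict Int (List Int) :=
  (PySem.List.enumerate values).foldl
    (fun d p =>
      let d := if d.contains (cti.getD p.2 0) then d else d.insert (cti.getD p.2 0) ([] : List Int)
      let l := d.getD (cti.getD p.2 0) []
      d.insert (cti.getD p.2 0) (l ++ [p.1]))
    PySem.Dict.empty

def match_eqn (str1 : String) (str2 : String) : Bool :=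
  if PySem.Str.len str1 ≠ PySem.Str.len str2 then false
  else
    let values1 := str1.toList
    let values2 := str2.toList
    let cti1 := ctiFold values1
    let cti2 := ctiFold values2
    let hm1 := hashFold values1 cti1
    let hm2 := hashFold values2 cti2
    pyDictEqIntList hm1 hm2

-- ===== PORT B =====
-- the single loop of B over enumerate(zip(str1, str2)); `(f.get? a).getD i` is the value
-- Python's `first.setdefault(a, i)` returns, `f.setdefault a i` the updated dict.
def bLoop (pairs : List (Int × (Char × Char))) (f1 f2 : PySem.Dict Char Int) : Bool :=
  match pairs with
  | [] => true
  | (i, (a, b)) :: rest =>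
    if (f1.get? a).getD i ≠ (f2.get? b).getD i then false
    else bLoop rest (f1.setdefault a i) (f2.setdefault b i)

def match_eqn_alt (str1 : String) (str2 : String) : Bool :=
  if PySem.Str.len str1 ≠ PySem.Str.len str2 then false
  else bLoop (PySem.List.enumerate (str1.toList.zip str2.toList)) PySem.Dict.empty PySem.Dict.empty

-- ===== PRECONDITION & SPEC =====
def Spec_match_eqn (str1 : String) (str2 : String) (out : Bool) : Prop := out = match_eqn_alt str1 str2
instance (str1 : String) (str2 : String) (out : Bool) : Decidable (Spec_match_eqn str1 str2 out) := by unfold Spec_match_eqn; infer_instance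

-- ===== CLAIM (what is proved, stated in full; the proofs are below) =====
def Claim_equal_match_eqn : Prop := ∀ (str1 : String) (str2 : String), Dom_match_eqn str1 str2 → Spec_match_eqn str1 str2 (match_eqn str1 str2)

-- ===== LEMMAS AND PROOFS =====

theorem idxOf_getElem_of_not_mem_take (l : List Char) (k : Nat) (h : k < l.length)
    (hn : l[k] ∉ l.take k) : l.idxOf l[k] = k := by
  induction l generalizing k with
  | nil => simp at h
  | cons x xs ih =>
    cases k with
    | zero => simp
    | succ k =>
      simp only [List.take_succ_cons, List.mem_cons, not_or] at hn
      simp only [List.getElem_cons_succ] at *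
      rw [List.idxOf_cons]
      have := ih k (by simpa using h) hn.2
      simp [beq_iff_eq, Ne.symm hn.1, this, Bool.cond_eq_ite]

theorem ctiFold_aux_get? (l : List Char) : ∀ (s : Int) (d : PySem.Dict Char Int) (c : Char),
    ((PySem.List.enumerate l s).foldl
        (fun d p => if d.contains p.2 then d else d.insert p.2 p.1) d).get? c =
      if d.contains c then d.get? c
      else if c ∈ l then some (s + (l.idxOf c : Int)) else none := by
  induction l with
  | nil =>
    intro s d c
    simp only [PySem.List.enumerate_nil, List.foldl_nil, List.not_mem_nil, if_false]
    by_cases h : d.contains c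
    · simp [h]
    · simp [h, (PySem.Dict.get?_eq_none_iff_contains d c).mpr (by simpa using h)]
  | cons x xs ih =>
    intro s d c
    rw [PySem.List.enumerate_cons, List.foldl_cons, ih]
    by_cases hx : d.contains x
    · simp only [hx, if_true]
      by_cases hc : d.contains c
      · simp [hc]
      · have hcx : c ≠ x := fun h => hc (h ▸ hx)
        simp only [hc, if_false, List.mem_cons, hcx, false_or, List.idxOf_cons,
          beq_iff_eq, Ne.symm hcx, Bool.cond_eq_ite, if_false]
        by_cases hm : c ∈ xs
        · simp [hm]; ring
        · simp [hm]
    · rw [if_neg hx]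
      by_cases hcx : c = x
      · subst hcx
        simp [PySem.Dict.get?_insert_self, hx]
      · rw [PySem.Dict.contains_insert, PySem.Dict.get?_insert_of_ne _ _ hcx]
        simp only [beq_iff_eq, hcx, List.mem_cons, false_or, List.idxOf_cons,
          Ne.symm hcx, Bool.cond_eq_ite, beq_iff_eq, if_false]
        by_cases hc : d.contains c
        · simp [hc]
        · by_cases hm : c ∈ xs
          · simp [hc, hm, hcx]; ring
          · simp [hc, hm, hcx]

theorem ctiFold_getD (l : List Char) (c : Char) (hc : c ∈ l) :
    (ctiFold l).getD c 0 = (l.idxOf c : Int) := by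
  rw [PySem.Dict.getD_eq_get?_getD]
  unfold ctiFold
  rw [show PySem.List.enumerate l = PySem.List.enumerate l 0 from rfl, ctiFold_aux_get?]
  simp [hc]

theorem hashFold_eq_modify (l : List Char) (cti : PySem.Dict Char Int) :
    hashFold l cti = ((PySem.List.enumerate l).map (fun p => (cti.getD p.2 0, p.1))).foldl
      (fun d q => d.modify q.1 [] (· ++ [q.2])) PySem.Dict.empty := by
  unfold hashFold
  rw [List.foldl_map]
  congr 1
  funext d p
  by_cases h : d.contains (cti.getD p.2 0)
  · rw [if_pos h]; rfl
  · rw [if_neg h]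
    show (d.insert (cti.getD p.2 0) []).insert (cti.getD p.2 0)
        ((d.insert (cti.getD p.2 0) ([] : List Int)).getD (cti.getD p.2 0) [] ++ [p.1])
      = d.insert (cti.getD p.2 0) (d.getD (cti.getD p.2 0) [] ++ [p.1])
    rw [PySem.Dict.getD_insert_self, PySem.Dict.insert_insert_self,
      PySem.Dict.getD_of_not_contains d ([] : List Int) (by simpa using h)]

def Fm (l : List Char) (cti : PySem.Dict Char Int) (k : Int) : List Int :=
  ((PySem.List.enumerate l).filter (fun p => cti.getD p.2 0 == k)).map (·.1)

theorem hashFold_getD (l : List Char) (cti : PySem.Dict Char Int) (k : Int) :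
    (hashFold l cti).getD k [] = Fm l cti k := by
  rw [hashFold_eq_modify, PySem.Dict.getD_foldl_modify_append]
  simp [Fm, List.filter_map, List.map_map, Function.comp_def]

theorem hashFold_contains (l : List Char) (cti : PySem.Dict Char Int) (k : Int) :
    (hashFold l cti).contains k = true ↔ Fm l cti k ≠ [] := by
  rw [hashFold_eq_modify, PySem.Dict.contains_iff_mem_keys]
  have hkeys := PySem.Dict.keys_foldl_modify_key
    (List.map (fun p => (cti.getD p.2 0, p.1)) (PySem.List.enumerate l))
    (fun q => q.1) ([] : List Int) (fun _ q v => v ++ [q.2]) PySem.Dict.empty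
  simp only [hkeys, PySem.Dict.keys_empty, PySem.Set.update_nil_left, List.map_map]
  rw [PySem.Set.mem_ofList]
  simp only [Fm, ne_eq, List.map_eq_nil_iff, List.filter_eq_nil_iff, not_forall]
  constructor
  · intro h
    rcases List.mem_map.mp h with ⟨p, hp, hk⟩
    refine ⟨p, hp, ?_⟩
    simpa using hk
  · rintro ⟨p, hp, hk⟩
    refine List.mem_map.mpr ⟨p, hp, ?_⟩
    simpa using hk

def CanonEq (l1 l2 : List Char) : Prop :=
  ∀ i (h1 : i < l1.length) (h2 : i < l2.length), l1.idxOf l1[i] = l2.idxOf l2[i]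

theorem pyDictEq_hash_iff (l1 l2 : List Char) (c1 c2 : PySem.Dict Char Int) :
    pyDictEqIntList (hashFold l1 c1) (hashFold l2 c2) = true ↔
      ∀ k, Fm l1 c1 k = Fm l2 c2 k := by
  unfold pyDictEqIntList
  rw [Bool.and_eq_true, List.all_eq_true, List.all_eq_true]
  constructor
  · rintro ⟨h1, h2⟩ k
    by_cases hk1 : Fm l1 c1 k = []
    · by_cases hk2 : Fm l2 c2 k = []
      · rw [hk1, hk2]
      · exfalso
        have hc2 : (hashFold l2 c2).contains k = true := (hashFold_contains l2 c2 k).mpr hk2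
        have := h2 k ((PySem.Dict.contains_iff_mem_keys _ _).mp hc2)
        exact ((hashFold_contains l1 c1 k).mp this) hk1
    · have hc1 : (hashFold l1 c1).contains k = true := (hashFold_contains l1 c1 k).mpr hk1
      have := h1 k ((PySem.Dict.contains_iff_mem_keys _ _).mp hc1)
      rw [Bool.and_eq_true, beq_iff_eq, hashFold_getD, hashFold_getD] at this
      exact this.2
  · intro h
    constructor
    · intro k hk
      have hc1 : (hashFold l1 c1).contains k = true :=
        (PySem.Dict.contains_iff_mem_keys _ _).mpr hk
      have hne : Fm l1 c1 k ≠ [] := (hashFold_contains l1 c1 k).mp hc1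
      rw [Bool.and_eq_true, beq_iff_eq, hashFold_getD, hashFold_getD]
      exact ⟨(hashFold_contains l2 c2 k).mpr (by rw [← h k]; exact hne), h k⟩
    · intro k hk
      have hc2 : (hashFold l2 c2).contains k = true :=
        (PySem.Dict.contains_iff_mem_keys _ _).mpr hk
      have hne : Fm l2 c2 k ≠ [] := (hashFold_contains l2 c2 k).mp hc2
      exact (hashFold_contains l1 c1 k).mpr (by rw [h k]; exact hne)

theorem Fm_eq_iff_canon (l1 l2 : List Char) (hlen : l1.length = l2.length) :
    (∀ k, Fm l1 (ctiFold l1) k = Fm l2 (ctiFold l2) k) ↔ CanonEq l1 l2 := by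
  constructor
  · intro h i h1 h2
    have hmem1 : ((i : Int), l1[i]) ∈ PySem.List.enumerate l1 0 :=
      (PySem.List.mem_enumerate_iff l1 0 _).mpr ⟨i, h1, by simp⟩
    have hin1 : (i : Int) ∈ Fm l1 (ctiFold l1) ((l1.idxOf l1[i] : Nat) : Int) := by
      unfold Fm
      refine List.mem_map.mpr ⟨((i : Int), l1[i]), ?_, rfl⟩
      refine List.mem_filter.mpr ⟨hmem1, ?_⟩
      simp [ctiFold_getD l1 l1[i] (List.getElem_mem h1)]
    rw [h _] at hin1
    unfold Fm at hin1
    rcases List.mem_map.mp hin1 with ⟨p, hp, hfst⟩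
    rcases (PySem.List.mem_enumerate_iff l2 0 p).mp (List.mem_filter.mp hp).1 with ⟨m, hm, rfl⟩
    have hmi : m = i := by
      have : ((m : Int)) = (i : Int) := by simpa using hfst
      exact_mod_cast this
    subst hmi
    have := (List.mem_filter.mp hp).2
    rw [beq_iff_eq] at this
    rw [ctiFold_getD l2 l2[m] (List.getElem_mem hm)] at this
    exact_mod_cast this.symm
  · intro h k
    unfold Fm
    rw [PySem.List.enumerate_eq_map_pyRange l1 'a', PySem.List.enumerate_eq_map_pyRange l2 'a']
    simp only [PySem.List.len]
    rw [hlen]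
    rw [show ((l2.length : Int)) = ((l2.length : Nat) : Int) from rfl, PySem.List.pyRange_zero_natCast]
    simp only [List.filter_map, List.map_map, Function.comp_def]
    congr 1
    apply List.filter_congr
    intro j hj
    have hjl : j < l2.length := List.mem_range.mp hj
    rw [PySem.List.pyGetD_natCast, PySem.List.pyGetD_natCast]
    rw [List.getD_eq_getElem _ _ (by omega), List.getD_eq_getElem _ _ (by omega)]
    rw [ctiFold_getD l1 _ (List.getElem_mem (by omega)), ctiFold_getD l2 _ (List.getElem_mem (by omega))]
    rw [h j (by omega) (by omega)]

theorem getElem_of_drop_cons {l : List Char} {k : Nat} {a : Char} {s : List Char}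
    (hd : l.drop k = a :: s) (h : k < l.length) : l[k] = a := by
  have h0 : 0 < (l.drop k).length := by rw [hd]; simp
  have h1 := List.getElem_drop (xs := l) (i := k) (j := 0) (h := h0)
  have h2 : (l.drop k)[0]'h0 = a := by simp [hd]
  simpa using h1.symm.trans h2

theorem lt_length_of_drop_cons {l : List Char} {k : Nat} {a : Char} {s : List Char}
    (hd : l.drop k = a :: s) : k < l.length := by
  by_contra h
  rw [List.drop_eq_nil_of_le (by omega)] at hd
  simp at hd

def FirstMap (l : List Char) (k : Nat) (f : PySem.Dict Char Int) : Prop :=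
  ∀ c, f.get? c = if c ∈ l.take k then some ((l.idxOf c : Nat) : Int) else none

theorem FirstMap_step {l : List Char} {k : Nat} {f : PySem.Dict Char Int}
    (hk : k < l.length) (hF : FirstMap l k f) :
    FirstMap l (k + 1) (f.setdefault l[k] (k : Int)) := by
  intro c
  by_cases hc : c = l[k]
  · subst hc
    rw [PySem.Dict.get?_setdefault_self, hF _]
    have hmem : l[k] ∈ l.take (k + 1) := by
      rw [List.take_add_one]
      exact List.mem_append.mpr (Or.inr (by simp [List.getElem?_eq_getElem hk]))
    rw [if_pos hmem]
    by_cases hm : l[k] ∈ l.take k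
    · rw [if_pos hm, Option.getD_some]
    · rw [if_neg hm]
      simp only [Option.getD_none]
      exact congrArg _ (congrArg _ (idxOf_getElem_of_not_mem_take l k hk hm)).symm
  · rw [PySem.Dict.get?_setdefault_of_ne _ _ hc, hF c]
    have : (c ∈ l.take (k + 1)) ↔ (c ∈ l.take k) := by
      rw [List.take_add_one]
      simp only [List.mem_append, List.getElem?_eq_getElem hk]
      constructor
      · rintro (h | h)
        · exact h
        · exact absurd (by simpa using h) hc
      · exact Or.inl
    by_cases hm : c ∈ l.take k
    · rw [if_pos hm, if_pos (this.mpr hm)]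
    · rw [if_neg hm, if_neg (fun hx => hm (this.mp hx))]

theorem bLoop_eq (s1 : List Char) : ∀ (s2 l1 l2 : List Char) (k : Nat)
    (f1 f2 : PySem.Dict Char Int),
    l1.drop k = s1 → l2.drop k = s2 → l1.length = l2.length →
    FirstMap l1 k f1 → FirstMap l2 k f2 →
    (bLoop (PySem.List.enumerate (s1.zip s2) (k : Int)) f1 f2 = true ↔
      ∀ i, k ≤ i → ∀ (h1 : i < l1.length) (h2 : i < l2.length),
        l1.idxOf l1[i] = l2.idxOf l2[i]) := by
  induction s1 with
  | nil =>
    intro s2 l1 l2 k f1 f2 hd1 _ _ _ _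
    have hk : l1.length ≤ k := by
      have := congrArg List.length hd1
      simp only [List.length_drop, List.length_nil] at this
      omega
    simp only [List.zip_nil_left, PySem.List.enumerate_nil]
    exact iff_of_true rfl (fun i hki h1 h2 => absurd h1 (by omega))
  | cons a s1' ih =>
    intro s2 l1 l2 k f1 f2 hd1 hd2 hlen hF1 hF2
    have hk1 : k < l1.length := lt_length_of_drop_cons hd1
    have hk2 : k < l2.length := by omega
    cases s2 with
    | nil =>
      exfalso
      have : l2.length ≤ k := by
        have := congrArg List.length hd2
        simp only [List.length_drop, List.length_nil] at this
        omega
      omega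
    | cons b s2' =>
      have ha : l1[k] = a := getElem_of_drop_cons hd1 hk1
      have hb : l2[k] = b := getElem_of_drop_cons hd2 hk2
      have hd1' : l1.drop (k + 1) = s1' := by
        have := congrArg List.tail hd1
        simpa [List.tail_drop] using this
      have hd2' : l2.drop (k + 1) = s2' := by
        have := congrArg List.tail hd2
        simpa [List.tail_drop] using this
      have hv1 : (f1.get? a).getD (k : Int) = ((l1.idxOf l1[k] : Nat) : Int) := by
        rw [hF1 a]
        by_cases hm : a ∈ l1.take k
        · rw [if_pos hm, Option.getD_some, ha]
        · rw [if_neg hm, Option.getD_none, ha]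
          have h := idxOf_getElem_of_not_mem_take l1 k hk1 (by rwa [ha])
          rw [ha] at h
          rw [h]
      have hv2 : (f2.get? b).getD (k : Int) = ((l2.idxOf l2[k] : Nat) : Int) := by
        rw [hF2 b]
        by_cases hm : b ∈ l2.take k
        · rw [if_pos hm, Option.getD_some, hb]
        · rw [if_neg hm, Option.getD_none, hb]
          have h := idxOf_getElem_of_not_mem_take l2 k hk2 (by rwa [hb])
          rw [hb] at h
          rw [h]
      rw [List.zip_cons_cons, PySem.List.enumerate_cons]
      show (if (f1.get? a).getD (k : Int) ≠ (f2.get? b).getD (k : Int) then false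
        else bLoop (PySem.List.enumerate (s1'.zip s2') ((k : Int) + 1))
          (f1.setdefault a (k : Int)) (f2.setdefault b (k : Int))) = true ↔ _
      by_cases hEq : l1.idxOf l1[k] = l2.idxOf l2[k]
      · have hcond : ¬ ((f1.get? a).getD (k : Int) ≠ (f2.get? b).getD (k : Int)) := by
          rw [hv1, hv2, hEq]; simp
        rw [if_neg hcond]
        have hF1' := FirstMap_step hk1 hF1
        have hF2' := FirstMap_step hk2 hF2
        rw [ha] at hF1'
        rw [hb] at hF2'
        have hcast : ((k : Int) + 1) = (((k + 1 : Nat)) : Int) := by push_cast; ring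
        rw [hcast]
        rw [ih s2' l1 l2 (k + 1) _ _ hd1' hd2' hlen hF1' hF2']
        constructor
        · intro hAll i hki h1 h2
          rcases Nat.eq_or_lt_of_le hki with rfl | hlt
          · exact hEq
          · exact hAll i (by omega) h1 h2
        · intro hAll i hki h1 h2
          exact hAll i (by omega) h1 h2
      · have hcond : (f1.get? a).getD (k : Int) ≠ (f2.get? b).getD (k : Int) := by
          rw [hv1, hv2]
          exact fun hx => hEq (by exact_mod_cast hx)
        rw [if_pos hcond]
        exact iff_of_false (by simp) (fun hAll => hEq (hAll k le_rfl hk1 hk2))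

theorem alt_iff_canon (l1 l2 : List Char) (hlen : l1.length = l2.length) :
    (bLoop (PySem.List.enumerate (l1.zip l2)) PySem.Dict.empty PySem.Dict.empty = true ↔
      CanonEq l1 l2) := by
  have h := bLoop_eq l1 l2 l1 l2 0 PySem.Dict.empty PySem.Dict.empty (by simp) (by simp) hlen
    (fun c => by simp [PySem.Dict.get?_empty]) (fun c => by simp [PySem.Dict.get?_empty])
  rw [Nat.cast_zero] at h
  rw [h]
  exact ⟨fun hA i h1 h2 => hA i (Nat.zero_le _) h1 h2, fun hC i _ h1 h2 => hC i h1 h2⟩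

-- ===== VERDICT (by name: the statement is the Claim_ definition above) =====
theorem match_eqn_spec : Claim_equal_match_eqn := by
  intro str1 str2 _
  unfold Spec_match_eqn match_eqn match_eqn_alt
  by_cases hl : str1.toList.length = str2.toList.length
  · have hlen : ¬ PySem.Str.len str1 ≠ PySem.Str.len str2 := by
      simp [PySem.Str.len, hl]
    rw [if_neg hlen, if_neg hlen, Bool.eq_iff_iff,
       pyDictEq_hash_iff, Fm_eq_iff_canon _ _ hl, alt_iff_canon _ _ hl]
  · have hlen : PySem.Str.len str1 ≠ PySem.Str.len str2 := by
      simp only [PySem.Str.len, ne_eq, Nat.cast_inj]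
      exact hl
    rw [if_pos hlen, if_pos hlen]
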